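-- pv_equiv track=rewrite | github.com/WizardScope/Universal_video_transcriber | Universal_video_transcriber_v3_6_1.py | build_questions
-- ===== SOURCE A (Python) =====
-- from typing import Dict, Iterable, List, Optional, Tuple
--
-- MAX_STUDY_QUESTIONS = 24
--
-- def build_questions(sections: List[Dict[str, object]], glossary: List[Tuple[str, str]], max_questions: int = MAX_STUDY_QUESTIONS) -> List[str]:
--     questions: List[str] = []
--     seen = set()
--
--     for sec in sections:
--         title = str(sec["title"]).strip().rstrip(".?!")
--         if title:
--             q = f"Что важно понять в теме «{title}»?"
--             if q not in seen:
--                 questions.append(q)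
--                 seen.add(q)
--             q2 = f"Как своими словами объяснить тему «{title}»?"
--             if q2 not in seen:
--                 questions.append(q2)
--                 seen.add(q2)
--
--     for term, definition in glossary:
--         q = f"Что означает термин «{term}» и где он используется?"
--         if q not in seen:
--             questions.append(q)
--             seen.add(q)
--         if len(questions) >= max_questions:
--             break
--
--     return questions[:max_questions]
-- ===== SOURCE B (Python) =====
-- from typing import Dict, List, Tuple
--
-- MAX_STUDY_QUESTIONS = 24
--
-- def build_questions(sections: List[Dict[str, object]], glossary: List[Tuple[str, str]], max_questions: int = MAX_STUDY_QUESTIONS) -> List[str]: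
--     # Pass 1: one flat list of every candidate question, in order — no dedup, no cap.
--     candidates: List[str] = []
--     for sec in sections:
--         title = str(sec["title"]).strip().rstrip(".?!")
--         if title:
--             candidates.append(f"Что важно понять в теме «{title}»?")
--             candidates.append(f"Как своими словами объяснить тему «{title}»?")
--     for term, _definition in glossary:
--         candidates.append(f"Что означает термин «{term}» и где он используется?")
--     # Pass 2: order-preserving dedup, then a single truncation.
--     result: List[str] = []
--     seen = set()
--     for q in candidates:
--         if q not in seen:
--             seen.add(q)
--             result.append(q)
--     return result[:max_questions]
-- ===== Notes on version B (the rewrite author's own statement) =====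
-- stated objective: alternative
-- what changed: B splits A's single interleaved dedup-and-cap traversal into two separate passes: first build the full flat candidate list (sections then glossary, no dedup, no cap), then one order-preserving dedup pass followed by a single truncation, relying on the final slice to reproduce A's early break.
import Mathlib
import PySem

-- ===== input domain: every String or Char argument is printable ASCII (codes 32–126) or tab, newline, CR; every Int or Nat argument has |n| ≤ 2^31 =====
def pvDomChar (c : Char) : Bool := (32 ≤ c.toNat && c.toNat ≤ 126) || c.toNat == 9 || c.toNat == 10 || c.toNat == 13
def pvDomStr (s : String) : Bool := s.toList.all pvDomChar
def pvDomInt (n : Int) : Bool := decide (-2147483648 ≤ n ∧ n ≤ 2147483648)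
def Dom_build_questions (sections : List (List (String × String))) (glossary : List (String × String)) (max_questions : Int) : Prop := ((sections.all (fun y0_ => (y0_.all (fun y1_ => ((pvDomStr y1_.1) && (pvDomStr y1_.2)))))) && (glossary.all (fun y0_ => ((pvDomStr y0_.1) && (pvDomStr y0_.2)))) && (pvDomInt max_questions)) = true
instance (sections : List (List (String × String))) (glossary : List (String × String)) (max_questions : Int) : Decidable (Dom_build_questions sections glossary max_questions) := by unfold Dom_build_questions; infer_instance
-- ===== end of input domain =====

-- B rebuilds A's result in two separate passes (flat candidate list, then dedup + one truncation); equal return values proved on Pre_.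

-- shared helpers: both Python versions compute the title and the three f-strings identically
-- Python s.rstrip(".?!") ported by hand (PySem has no rstrip-with-chars): drop trailing chars of the set — exact.
def pvRstripChars (s : List Char) (chars : List Char) : List Char :=
  (s.reverse.dropWhile (fun c => chars.contains c)).reverse

-- sec["title"]: first-match association lookup (KeyError excluded by Pre_, so the getD default is never used there)
def pvTitle (sec : List (String × String)) : String :=
  String.ofList (pvRstripChars (PySem.Str.strip ((List.lookup "title" sec).getD "")).toList ['.', '?', '!'])

def qTopic (t : String) : String := "Что важно понять в теме «" ++ t ++ "»?"
def qExplain (t : String) : String := "Как своими словами объяснить тему «" ++ t ++ "»?"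
def qTerm (t : String) : String := "Что означает термин «" ++ t ++ "» и где он используется?"

-- ===== PORT A =====
-- the second Python loop: append-if-new, break once len(questions) >= max_questions
def glossLoopA (qs : List String) (seen : PySem.Set String) (gl : List (String × String)) (maxq : Int) : List String :=
  match gl with
  | [] => qs
  | (term, _definition) :: rest =>
    let q := qTerm term
    let st := if PySem.Set.contains seen q then (qs, seen) else (qs ++ [q], PySem.Set.add seen q)
    if (st.1.length : Int) ≥ maxq then st.1 else glossLoopA st.1 st.2 rest maxq

def build_questions (sections : List (List (String × String))) (glossary : List (String × String)) (max_questions : Int) : List String :=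
  let st := sections.foldl (fun (st : List String × PySem.Set String) sec =>
    let title := pvTitle sec
    if title ≠ "" then
      let q := qTopic title
      let st1 := if PySem.Set.contains st.2 q then st else (st.1 ++ [q], PySem.Set.add st.2 q)
      let q2 := qExplain title
      if PySem.Set.contains st1.2 q2 then st1 else (st1.1 ++ [q2], PySem.Set.add st1.2 q2)
    else st) ([], PySem.Set.empty)
  PySem.List.slice (glossLoopA st.1 st.2 glossary max_questions) none (some max_questions)

-- ===== PORT B =====
def build_questions_alt (sections : List (List (String × String))) (glossary : List (String × String)) (max_questions : Int) : List String :=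
  -- pass 1: flat candidate list, no dedup, no cap
  let candidates := sections.foldl (fun (acc : List String) sec =>
    let title := pvTitle sec
    if title ≠ "" then acc ++ [qTopic title, qExplain title] else acc) []
  let candidates := glossary.foldl (fun (acc : List String) p => acc ++ [qTerm p.1]) candidates
  -- pass 2: order-preserving dedup, then one truncation
  let st := candidates.foldl (fun (st : List String × PySem.Set String) q =>
    if PySem.Set.contains st.2 q then st else (st.1 ++ [q], PySem.Set.add st.2 q)) ([], PySem.Set.empty)
  PySem.List.slice st.1 none (some max_questions)

-- ===== PRECONDITION & SPEC =====
-- Pre_ excludes (a) sections without a "title" key, where Python A raises KeyError, and (b) negative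
-- max_questions, a degenerate corner where A's early break interacts with Python's negative-slice
-- truncation so that A's and B's values are both accidental (see cites in claim.json).
def Pre_build_questions (sections : List (List (String × String))) (glossary : List (String × String)) (max_questions : Int) : Prop :=
  (∀ sec ∈ sections, ∃ kv ∈ sec, kv.1 = "title") ∧ 0 ≤ max_questions

instance (sections : List (List (String × String))) (glossary : List (String × String)) (max_questions : Int) : Decidable (Pre_build_questions sections glossary max_questions) := by unfold Pre_build_questions; infer_instance

def pvWitness_build_questions : (List (List (String × String))) × (List (String × String)) × Int :=
  ([[("title", "Intro.")], [("title", "  ")]], [("term", "def"), ("term", "def2")], 3)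

def Spec_build_questions (sections : List (List (String × String))) (glossary : List (String × String)) (max_questions : Int) (out : List String) : Prop := out = build_questions_alt sections glossary max_questions
instance (sections : List (List (String × String))) (glossary : List (String × String)) (max_questions : Int) (out : List String) : Decidable (Spec_build_questions sections glossary max_questions out) := by unfold Spec_build_questions; infer_instance

-- ===== CLAIM (what is proved, stated in full; the proofs are below) =====
def Claim_equal_build_questions : Prop := ∀ (sections : List (List (String × String))) (glossary : List (String × String)) (max_questions : Int), Dom_build_questions sections glossary max_questions → Pre_build_questions sections glossary max_questions → Spec_build_questions sections glossary max_questions (build_questions sections glossary max_questions)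

-- ===== LEMMAS AND PROOFS =====

-- the common dedup step
def dstep (st : List String × PySem.Set String) (q : String) : List String × PySem.Set String :=
  if PySem.Set.contains st.2 q then st else (st.1 ++ [q], PySem.Set.add st.2 q)

def secCands (sec : List (String × String)) : List String :=
  let t := pvTitle sec
  if t ≠ "" then [qTopic t, qExplain t] else []

-- A's section-loop body performs exactly the dstep-fold over that section's candidates
lemma secA_step (st : List String × PySem.Set String) (sec : List (String × String)) :
    (let title := pvTitle sec
     if title ≠ "" then
       let q := qTopic title
       let st1 := if PySem.Set.contains st.2 q then st else (st.1 ++ [q], PySem.Set.add st.2 q)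
       let q2 := qExplain title
       if PySem.Set.contains st1.2 q2 then st1 else (st1.1 ++ [q2], PySem.Set.add st1.2 q2)
     else st)
    = List.foldl dstep st (secCands sec) := by
  by_cases h : pvTitle sec = ""
  · simp [secCands, h]
  · simp [secCands, dstep, h]

-- A's section loop is the dstep-fold over the flat section candidates
lemma secA_eq (sections : List (List (String × String))) (st : List String × PySem.Set String) :
    sections.foldl (fun (st : List String × PySem.Set String) sec =>
      let title := pvTitle sec
      if title ≠ "" then
        let q := qTopic title
        let st1 := if PySem.Set.contains st.2 q then st else (st.1 ++ [q], PySem.Set.add st.2 q)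
        let q2 := qExplain title
        if PySem.Set.contains st1.2 q2 then st1 else (st1.1 ++ [q2], PySem.Set.add st1.2 q2)
      else st) st
    = List.foldl dstep st (sections.flatMap secCands) := by
  induction sections generalizing st with
  | nil => rfl
  | cons sec rest ih =>
    rw [List.foldl_cons, secA_step st sec, List.flatMap_cons, List.foldl_append, ih]

-- B's first pass builds exactly the flat section candidates
lemma secB_eq (sections : List (List (String × String))) (acc : List String) :
    sections.foldl (fun (acc : List String) sec =>
      let title := pvTitle sec
      if title ≠ "" then acc ++ [qTopic title, qExplain title] else acc) acc
    = acc ++ sections.flatMap secCands := by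
  induction sections generalizing acc with
  | nil => simp
  | cons sec rest ih =>
    rw [List.foldl_cons, ih]
    by_cases h : pvTitle sec = "" <;> simp [secCands, h]

lemma glossB_eq (glossary : List (String × String)) (acc : List String) :
    glossary.foldl (fun (acc : List String) p => acc ++ [qTerm p.1]) acc
    = acc ++ glossary.map (fun p => qTerm p.1) := by
  induction glossary generalizing acc with
  | nil => simp
  | cons p rest ih => simp [ih]

-- a dstep-fold only ever appends to the question list
lemma dstep_fold_prefix (l : List String) (st : List String × PySem.Set String) :
    ∃ t, (List.foldl dstep st l).1 = st.1 ++ t := by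
  induction l generalizing st with
  | nil => exact ⟨[], by simp⟩
  | cons q rest ih =>
    obtain ⟨t, ht⟩ := ih (dstep st q)
    by_cases h : q ∈ st.2
    · exact ⟨t, by rw [List.foldl_cons, ht]; simp [dstep, h]⟩
    · refine ⟨q :: t, ?_⟩
      rw [List.foldl_cons, ht]
      simp [dstep, h]

-- A's glossary loop with its early break agrees with the full dstep-fold after truncation
lemma gloss_eq (gl : List (String × String)) :
    ∀ (st : List String × PySem.Set String) (m : Int), 0 ≤ m →
    (glossLoopA st.1 st.2 gl m).take m.toNat
    = (List.foldl dstep st (gl.map (fun p => qTerm p.1))).1.take m.toNat := by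
  induction gl with
  | nil => intro st m hm; rfl
  | cons p rest ih =>
    intro st m hm
    obtain ⟨term, d⟩ := p
    rw [List.map_cons, List.foldl_cons]
    show (glossLoopA st.1 st.2 ((term, d) :: rest) m).take m.toNat
      = (List.foldl dstep (dstep st (qTerm term)) (rest.map (fun p => qTerm p.1))).1.take m.toNat
    unfold glossLoopA
    have hstep : (if PySem.Set.contains st.2 (qTerm term) then (st.1, st.2)
        else (st.1 ++ [qTerm term], PySem.Set.add st.2 (qTerm term))) = dstep st (qTerm term) := by
      by_cases h : qTerm term ∈ st.2 <;> simp [dstep, h]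
    simp only [hstep]
    by_cases hbr : ((dstep st (qTerm term)).1.length : Int) ≥ m
    · simp only [hbr, if_pos]
      obtain ⟨t, ht⟩ := dstep_fold_prefix (rest.map (fun p => qTerm p.1)) (dstep st (qTerm term))
      rw [ht, List.take_append_of_le_length]
      omega
    · simp only [hbr, if_neg, not_false_iff]
      exact ih (dstep st (qTerm term)) m hm

lemma take_toNat_eq_slice (xs : List String) (m : Int) (hm : 0 ≤ m) :
    PySem.List.slice xs none (some m) = xs.take m.toNat :=
  PySem.List.slice_to xs hm

-- ===== VERDICT (by name: the statement is the Claim_ definition above) =====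
theorem build_questions_spec : Claim_equal_build_questions := by
  intro sections glossary max_questions _hdom hpre
  obtain ⟨_htitle, hm⟩ := hpre
  unfold Spec_build_questions build_questions build_questions_alt
  simp only []
  rw [secA_eq, secB_eq, glossB_eq, List.nil_append,
    take_toNat_eq_slice _ _ hm, take_toNat_eq_slice _ _ hm]
  have hd : (fun (st : List String × PySem.Set String) q =>
      if PySem.Set.contains st.2 q then st else (st.1 ++ [q], PySem.Set.add st.2 q)) = dstep := rfl
  rw [hd, List.foldl_append]
  exact gloss_eq glossary _ max_questions hm
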